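-- pv_equiv track=rewrite | github.com/skkholiya/todo | collections/list_exercise.py | remove_number_of_elements
-- ===== SOURCE A (Python) =====
-- def remove_number_of_elements(ls,times):
--   count = 1
--   result = []
--   for i in ls:
--     if count>times or (i%2 != 0):
--       result.append(i);
--     else:
--       count +=1;
--
--   return result;
-- ===== SOURCE B (Python) =====
-- def remove_number_of_elements(ls, times):
--     # Precompute the indices of the first `times` even elements, then filter them out.
--     skip = set()
--     need = times
--     for j, x in enumerate(ls):
--         if need <= 0:
--             break
--         if x % 2 == 0:
--             skip.add(j)
--             need -= 1
--     return [x for j, x in enumerate(ls) if j not in skip]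
-- ===== Notes on version B (the rewrite author's own statement) =====
-- stated objective: alternative
-- what changed: B precomputes in a first pass the set of indices of the first `times` even elements, then builds the result by filtering enumerate(ls) on index membership, instead of threading a running skip counter through one appending loop.
import Mathlib
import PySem

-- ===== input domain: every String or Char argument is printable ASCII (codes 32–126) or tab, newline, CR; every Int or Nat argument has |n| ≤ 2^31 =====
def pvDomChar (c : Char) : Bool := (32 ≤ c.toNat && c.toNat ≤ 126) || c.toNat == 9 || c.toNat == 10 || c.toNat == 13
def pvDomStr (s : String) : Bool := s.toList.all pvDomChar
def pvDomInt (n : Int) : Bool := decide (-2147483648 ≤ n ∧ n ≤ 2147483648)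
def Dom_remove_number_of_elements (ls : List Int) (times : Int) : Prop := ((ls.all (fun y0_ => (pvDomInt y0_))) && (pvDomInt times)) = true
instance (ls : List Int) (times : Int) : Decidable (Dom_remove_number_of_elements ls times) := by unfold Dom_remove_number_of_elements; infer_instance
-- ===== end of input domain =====

-- B precomputes the indices of the first `times` even elements, then filters enumerate(ls)
-- on index membership (alternative decomposition; same cost).

-- ===== PORT A =====
def remove_number_of_elements (ls : List Int) (times : Int) : List Int :=
  (ls.foldl
    (fun (st : Int × List Int) (i : Int) =>
      if st.1 > times ∨ PySem.Int.mod i 2 ≠ 0 then (st.1, st.2 ++ [i])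
      else (st.1 + 1, st.2))
    ((1 : Int), ([] : List Int))).2

-- ===== PORT B =====
-- first pass of Source B: loop over enumerate(ls), breaking once `need <= 0`
def altCollect (rest : List (Int × Int)) (need : Int) (skip : PySem.Set Int) : PySem.Set Int :=
  match rest with
  | [] => skip
  | (j, x) :: rest =>
    if need ≤ 0 then skip
    else if PySem.Int.mod x 2 = 0 then altCollect rest (need - 1) (PySem.Set.add skip j)
    else altCollect rest need skip

def remove_number_of_elements_alt (ls : List Int) (times : Int) : List Int :=
  let skip := altCollect (PySem.List.enumerate ls 0) times PySem.Set.empty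
  (PySem.List.enumerate ls 0).filterMap
    (fun p => if PySem.Set.contains skip p.1 then none else some p.2)

-- ===== PRECONDITION & SPEC =====
def Spec_remove_number_of_elements (ls : List Int) (times : Int) (out : List Int) : Prop := out = remove_number_of_elements_alt ls times
instance (ls : List Int) (times : Int) (out : List Int) : Decidable (Spec_remove_number_of_elements ls times out) := by unfold Spec_remove_number_of_elements; infer_instance

-- ===== CLAIM (what is proved, stated in full; the proofs are below) =====
def Claim_equal_remove_number_of_elements : Prop := ∀ (ls : List Int) (times : Int), Dom_remove_number_of_elements ls times → Spec_remove_number_of_elements ls times (remove_number_of_elements ls times)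

-- ===== LEMMAS AND PROOFS =====

-- recursive reading of A's loop
def aGo (times : Int) (count : Int) : List Int → List Int
  | [] => []
  | x :: xs =>
    if count > times ∨ PySem.Int.mod x 2 ≠ 0 then x :: aGo times count xs
    else aGo times (count + 1) xs

theorem aGo_cons (times count x : Int) (xs : List Int) :
    aGo times count (x :: xs) =
      if count > times ∨ PySem.Int.mod x 2 ≠ 0 then x :: aGo times count xs
      else aGo times (count + 1) xs := rfl

theorem foldlA (times : Int) : ∀ (xs : List Int) (count : Int) (acc : List Int),
    (xs.foldl
      (fun (st : Int × List Int) (i : Int) =>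
        if st.1 > times ∨ PySem.Int.mod i 2 ≠ 0 then (st.1, st.2 ++ [i])
        else (st.1 + 1, st.2))
      (count, acc)).2 = acc ++ aGo times count xs := by
  intro xs
  induction xs with
  | nil => intro count acc; simp [aGo]
  | cons x xs ih =>
    intro count acc
    rw [List.foldl_cons, aGo_cons]
    by_cases h : count > times ∨ PySem.Int.mod x 2 ≠ 0
    · rw [if_pos h, if_pos h, ih]
      simp
    · rw [if_neg h, if_neg h, ih]

-- clean form of B's skip set
def pureSkip (xs : List Int) (s : Int) (need : Int) : List Int :=
  match xs with
  | [] => []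
  | x :: xs =>
    if need ≤ 0 then []
    else if PySem.Int.mod x 2 = 0 then s :: pureSkip xs (s + 1) (need - 1)
    else pureSkip xs (s + 1) need

theorem pureSkip_cons (x : Int) (xs : List Int) (s need : Int) :
    pureSkip (x :: xs) s need =
      if need ≤ 0 then []
      else if PySem.Int.mod x 2 = 0 then s :: pureSkip xs (s + 1) (need - 1)
      else pureSkip xs (s + 1) need := rfl

theorem altCollect_cons (j x need : Int) (rest : List (Int × Int)) (skip : PySem.Set Int) :
    altCollect ((j, x) :: rest) need skip =
      if need ≤ 0 then skip
      else if PySem.Int.mod x 2 = 0 then altCollect rest (need - 1) (PySem.Set.add skip j)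
      else altCollect rest need skip := rfl

theorem mem_pureSkip : ∀ (xs : List Int) (s need m : Int), m ∈ pureSkip xs s need → s ≤ m := by
  intro xs
  induction xs with
  | nil => intro s need m h; simp [pureSkip] at h
  | cons x xs ih =>
    intro s need m h
    rw [pureSkip_cons] at h
    by_cases h0 : need ≤ 0
    · rw [if_pos h0] at h; simp at h
    · rw [if_neg h0] at h
      by_cases he : PySem.Int.mod x 2 = 0
      · rw [if_pos he] at h
        rcases List.mem_cons.mp h with h | h
        · omega
        · have := ih (s + 1) (need - 1) m h; omega
      · rw [if_neg he] at h
        have := ih (s + 1) need m h; omega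

theorem collect_eq_pureSkip : ∀ (xs : List Int) (s need : Int) (skip : PySem.Set Int),
    (∀ m ∈ skip, m < s) →
    altCollect (PySem.List.enumerate xs s) need skip = skip ++ pureSkip xs s need := by
  intro xs
  induction xs with
  | nil => intro s need skip _; simp [PySem.List.enumerate, altCollect, pureSkip]
  | cons x xs ih =>
    intro s need skip hb
    rw [PySem.List.enumerate_cons, altCollect_cons, pureSkip_cons]
    by_cases h0 : need ≤ 0
    · rw [if_pos h0, if_pos h0]; simp
    · rw [if_neg h0, if_neg h0]
      by_cases he : PySem.Int.mod x 2 = 0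
      · rw [if_pos he, if_pos he]
        have hns : s ∉ skip := fun hm => absurd (hb s hm) (by omega)
        have hadd : PySem.Set.add skip s = skip ++ [s] := by
          simp only [PySem.Set.add, PySem.Set.contains]
          rw [if_neg (by simpa using hns)]
        have hb' : ∀ m ∈ skip ++ [s], m < s + 1 := by
          intro m hm
          rcases List.mem_append.mp hm with hm | hm
          · have := hb m hm; omega
          · simp at hm; omega
        rw [hadd, ih (s + 1) (need - 1) (skip ++ [s]) hb']
        simp
      · rw [if_neg he, if_neg he]
        rw [ih (s + 1) need skip (fun m hm => by have := hb m hm; omega)]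

-- the second pass only queries indices ≥ s
theorem filter_congr_skip : ∀ (xs : List Int) (s : Int) (S T : PySem.Set Int),
    (∀ m : Int, s ≤ m → (PySem.Set.contains S m = PySem.Set.contains T m)) →
    (PySem.List.enumerate xs s).filterMap
      (fun p => if PySem.Set.contains S p.1 then none else some p.2) =
    (PySem.List.enumerate xs s).filterMap
      (fun p => if PySem.Set.contains T p.1 then none else some p.2) := by
  intro xs
  induction xs with
  | nil => intro s S T _; simp [PySem.List.enumerate]
  | cons x xs ih =>
    intro s S T h
    rw [PySem.List.enumerate_cons]
    simp only [List.filterMap_cons]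
    rw [h s (le_refl s), ih (s + 1) S T (fun m hm => h m (by omega))]

theorem main_lemma (times : Int) : ∀ (xs : List Int) (s count need : Int),
    need = times + 1 - count →
    (PySem.List.enumerate xs s).filterMap
      (fun p => if PySem.Set.contains (pureSkip xs s need) p.1 then none else some p.2) =
    aGo times count xs := by
  intro xs
  induction xs with
  | nil => intro s count need _; simp [PySem.List.enumerate, aGo]
  | cons x xs ih =>
    intro s count need hn
    rw [PySem.List.enumerate_cons, aGo_cons]
    by_cases h0 : need ≤ 0
    · -- count > times : nothing is skipped
      have hc : count > times := by omega
      simp only [pureSkip_cons, if_pos h0, List.filterMap_cons]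
      have hS : PySem.Set.contains ([] : List Int) s = false := by
        simp [PySem.Set.contains]
      have htail := filter_congr_skip xs (s + 1) ([] : List Int) (pureSkip xs (s + 1) need)
        (fun m _ => by
          cases xs with
          | nil => rfl
          | cons y ys => rw [pureSkip_cons, if_pos h0]
      )
      rw [if_pos (Or.inl hc), htail, ih (s + 1) count need hn, hS]
      simp
    · by_cases he : PySem.Int.mod x 2 = 0
      · -- even element within the first `times`: dropped by both
        have hc : ¬ (count > times ∨ PySem.Int.mod x 2 ≠ 0) := by
          rintro (h | h) <;> [omega; exact h he]
        simp only [pureSkip_cons, if_neg h0, if_pos he, List.filterMap_cons]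
        have hhead : PySem.Set.contains (s :: pureSkip xs (s + 1) (need - 1)) s = true := by
          simp [PySem.Set.contains]
        have htail := filter_congr_skip xs (s + 1)
          (s :: pureSkip xs (s + 1) (need - 1)) (pureSkip xs (s + 1) (need - 1))
          (fun m hm => by
            simp only [PySem.Set.contains, List.contains_cons]
            have hne : (m == s) = false := by simp; omega
            rw [hne, Bool.false_or])
        rw [if_neg hc]
        simp only [hhead, reduceIte]
        rw [htail, ih (s + 1) (count + 1) (need - 1) (by omega)]
      · -- odd element: kept by both
        have hc : count > times ∨ PySem.Int.mod x 2 ≠ 0 := Or.inr he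
        simp only [pureSkip_cons, if_neg h0, if_neg he, List.filterMap_cons]
        have hhead : PySem.Set.contains (pureSkip xs (s + 1) need) s = false := by
          by_contra hcon
          have hmem : s ∈ pureSkip xs (s + 1) need := by
            simpa [PySem.Set.contains] using hcon
          have := mem_pureSkip xs (s + 1) need s hmem
          omega
        rw [if_pos hc, ih (s + 1) count need hn, hhead]
        simp

-- ===== VERDICT (by name: the statement is the Claim_ definition above) =====
theorem remove_number_of_elements_spec : Claim_equal_remove_number_of_elements := by
  unfold Claim_equal_remove_number_of_elements
  intro ls times _
  unfold Spec_remove_number_of_elements remove_number_of_elements remove_number_of_elements_alt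
  rw [foldlA times ls 1 []]
  rw [collect_eq_pureSkip ls 0 times PySem.Set.empty (by intro m hm; simp [PySem.Set.empty] at hm)]
  simp only [PySem.Set.empty, List.nil_append]
  exact (main_lemma times ls 0 1 times (by omega)).symm
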